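-- pv_equiv track=rewrite | github.com/Alvaropz/Python_problems_BinarySearch | 1. Easy/pair_and_triplets/pair_and_triplets.py | pair_and_triplets
-- ===== SOURCE A (Python) =====
-- def pair_and_triplets(s):
--     d = {}
--     for c in s:
--         if c in d:
--             d[c] += 1
--         else:
--             d[c] = 1
--
--     pair = 0
--     triplet = 0
--     for k in d:
--         if d[k] == 2:
--             pair += 1
--             if pair > 1:
--                 return False
--         elif (d[k] - 2) % 3 == 0:
--             pair += 1
--             triplet += 1
--         elif d[k] % 3 != 0:
--             return False
--     if pair != 1:
--         return False
--     else:
--         return True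
-- ===== SOURCE B (Python) =====
-- def pair_and_triplets(s):
--     t = sorted(s)
--     n = len(t)
--     pair = 0
--     i = 0
--     while i < n:
--         j = i
--         while j < n and t[j] == t[i]:
--             j += 1
--         r = (j - i) % 3
--         if r == 1:
--             return False
--         if r == 2:
--             pair += 1
--         i = j
--     return pair == 1
-- ===== Notes on version B (the rewrite author's own statement) =====
-- stated objective: alternative
-- what changed: Replaces the hash-map frequency table and dict-iteration classification with a sort-then-scan over runs of equal characters: run lengths are classified by their residue mod 3 in a single index walk over the sorted string.
import Mathlib
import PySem

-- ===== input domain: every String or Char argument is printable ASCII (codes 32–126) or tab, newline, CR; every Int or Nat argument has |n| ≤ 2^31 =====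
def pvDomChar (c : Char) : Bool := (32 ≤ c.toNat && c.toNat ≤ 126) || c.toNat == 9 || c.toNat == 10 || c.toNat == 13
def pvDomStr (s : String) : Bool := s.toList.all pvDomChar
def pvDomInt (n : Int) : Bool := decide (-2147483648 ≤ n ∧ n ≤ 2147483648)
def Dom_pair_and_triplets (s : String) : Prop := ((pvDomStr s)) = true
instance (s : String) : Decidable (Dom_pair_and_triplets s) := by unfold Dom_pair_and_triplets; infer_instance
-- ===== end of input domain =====

-- B replaces A's character-frequency dict and dict-order classification loop with a
-- sort-then-scan over runs of equal characters (alternative algorithm, same result).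

-- ===== PORT A =====
-- A's second loop, over the dict keys, with its early returns
def pvLoopA (d : PySem.Dict Char Int) : List Char → Int → Int → Bool
  | [], pair, _ => if pair ≠ 1 then false else true
  | k :: rest, pair, triplet =>
    let v := (d.get? k).getD 0
    if v == 2 then
      (if pair + 1 > 1 then false else pvLoopA d rest (pair + 1) triplet)
    else if PySem.Int.mod (v - 2) 3 == 0 then
      pvLoopA d rest (pair + 1) (triplet + 1)
    else if !(PySem.Int.mod v 3 == 0) then false
    else pvLoopA d rest pair triplet

def pair_and_triplets (s : String) : Bool :=
  let d := s.toList.foldl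
    (fun d c => if d.contains c then d.insert c ((d.get? c).getD 0 + 1) else d.insert c 1)
    PySem.Dict.empty
  pvLoopA d d.keys 0 0

-- ===== PORT B =====
-- B's while-loop: the inner while (run length) is takeWhile, advancing i to j is dropWhile
def pvRunScan : List Char → Int → Bool
  | [], pair => decide (pair = 1)
  | c :: rest, pair =>
    let run : Int := 1 + (rest.takeWhile (fun x => x == c)).length
    let r := PySem.Int.mod run 3
    if r == 1 then false
    else pvRunScan (rest.dropWhile (fun x => x == c)) (if r == 2 then pair + 1 else pair)
termination_by t _ => t.length
decreasing_by
  simp only [List.length_cons]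
  exact Nat.lt_succ_of_le (List.length_dropWhile_le _ _)

def pair_and_triplets_alt (s : String) : Bool :=
  pvRunScan (PySem.List.sorted s.toList (fun x => x) false) 0

-- ===== PRECONDITION & SPEC =====
def Spec_pair_and_triplets (s : String) (out : Bool) : Prop := out = pair_and_triplets_alt s
instance (s : String) (out : Bool) : Decidable (Spec_pair_and_triplets s out) := by unfold Spec_pair_and_triplets; infer_instance

-- ===== CLAIM (what is proved, stated in full; the proofs are below) =====
def Claim_equal_pair_and_triplets : Prop := ∀ (s : String), Dom_pair_and_triplets s → Spec_pair_and_triplets s (pair_and_triplets s)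

-- ===== LEMMAS AND PROOFS =====

-- common normal form of both programs, over a list of distinct characters ks with counts cnt:
-- "no count ≡ 1 (mod 3)" and "pair + #(counts ≡ 2 (mod 3)) = 1"
def pvSpecB (ks : List Char) (cnt : Char → Int) (pair : Int) : Bool :=
  (ks.all (fun c => !(cnt c % 3 == 1))) &&
  decide (pair + (ks.countP (fun c => cnt c % 3 == 2) : Int) = 1)

lemma pvSpecB_congr (ks ks' : List Char) (cnt cnt' : Char → Int) (pair : Int)
    (hperm : ks.Perm ks') (hcnt : ∀ x ∈ ks, cnt x = cnt' x) :
    pvSpecB ks cnt pair = pvSpecB ks' cnt' pair := by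
  have h1 : ks.countP (fun c => cnt c % 3 == 2) = ks'.countP (fun c => cnt' c % 3 == 2) := by
    rw [List.countP_congr (fun x hx => by rw [hcnt x hx])]
    exact hperm.countP_eq _
  have h2a : ks.all (fun c => !(cnt c % 3 == 1)) = ks.all (fun c => !(cnt' c % 3 == 1)) := by
    rw [Bool.eq_iff_iff]
    simp only [List.all_eq_true]
    exact ⟨fun h x hx => by rw [← hcnt x hx]; exact h x hx,
           fun h x hx => by rw [hcnt x hx]; exact h x hx⟩
  simp only [pvSpecB, h1, h2a, List.Perm.all_eq hperm]

lemma pvSpecB_cons (c : Char) (ks : List Char) (cnt : Char → Int) (pair : Int) :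
    pvSpecB (c :: ks) cnt pair =
      (if (cnt c % 3 == 1) then false
       else pvSpecB ks cnt (if (cnt c % 3 == 2) then pair + 1 else pair)) := by
  simp only [pvSpecB, List.all_cons, List.countP_cons]
  by_cases h1 : cnt c % 3 = 1
  · have hQ : (!(cnt c % 3 == 1) : Bool) = false := by simp [h1]
    have hP : (cnt c % 3 == 2) = false := by simp [h1]
    have hI : (cnt c % 3 == 1) = true := beq_iff_eq.mpr h1
    rw [hQ, hP, hI]
    simp
  · have hQ : (!(cnt c % 3 == 1) : Bool) = true := by simp [h1]
    have hI : (cnt c % 3 == 1) = false := by simp [h1]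
    rw [hQ, hI, Bool.true_and]
    by_cases h2 : cnt c % 3 = 2
    · have hP : (cnt c % 3 == 2) = true := beq_iff_eq.mpr h2
      rw [hP]
      simp only [pvSpecB, eq_self_iff_true, if_true]
      all_goals congr 1
      all_goals rw [decide_eq_decide]
      all_goals push_cast
      all_goals omega
    · have hP : (cnt c % 3 == 2) = false := by simp [h2]
      rw [hP]
      simp only [pvSpecB, Bool.false_eq_true, if_false]
      all_goals congr 1
      all_goals rw [decide_eq_decide]
      all_goals push_cast
      all_goals omega

lemma pvDropHead_false (p : Char → Bool) (l : List Char) (x : Char) (xs : List Char)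
    (h : l.dropWhile p = x :: xs) : p x = false := by
  induction l with
  | nil => simp [List.dropWhile] at h
  | cons a l ih =>
    rw [List.dropWhile_cons] at h
    by_cases hp : p a = true
    · exact ih (by rwa [if_pos hp] at h)
    · rw [if_neg hp] at h
      cases h
      simpa using hp

lemma pvLoopA_eq (d : PySem.Dict Char Int) :
    ∀ (ks : List Char) (pair triplet : Int),
      pvLoopA d ks pair triplet = pvSpecB ks (fun k => (d.get? k).getD 0) pair := by
  intro ks
  induction ks with
  | nil =>
    intro pair triplet
    simp [pvLoopA, pvSpecB]
  | cons k rest ih =>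
    intro pair triplet
    have h3 : (0:Int) < 3 := by norm_num
    have hm : PySem.Int.mod ((d.get? k).getD 0) 3 = ((d.get? k).getD 0) % 3 :=
      PySem.Int.mod_eq_emod_of_pos h3
    have hm2 : PySem.Int.mod ((d.get? k).getD 0 - 2) 3 = ((d.get? k).getD 0 - 2) % 3 :=
      PySem.Int.mod_eq_emod_of_pos h3
    have step : pvLoopA d (k :: rest) pair triplet =
        (let v := (d.get? k).getD 0
         if v == 2 then
           (if pair + 1 > 1 then false else pvLoopA d rest (pair + 1) triplet)
         else if PySem.Int.mod (v - 2) 3 == 0 then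
           pvLoopA d rest (pair + 1) (triplet + 1)
         else if !(PySem.Int.mod v 3 == 0) then false
         else pvLoopA d rest pair triplet) := rfl
    rw [step]
    simp only [pvSpecB, List.all_cons, List.countP_cons]
    set v : Int := (d.get? k).getD 0 with hv
    have hvr := Int.emod_nonneg v (by norm_num : (3:Int) ≠ 0)
    have hvl := Int.emod_lt_of_pos v h3
    by_cases hr2 : v % 3 = 2
    · have hQ : (!(v % 3 == 1) : Bool) = true := by simp [hr2]
      have hP : (v % 3 == 2) = true := beq_iff_eq.mpr hr2
      rw [hQ, hP]
      by_cases hv2 : v = 2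
      · by_cases hp : pair + 1 > 1
        · rw [if_pos (beq_iff_eq.mpr hv2), if_pos hp]
          have : (decide (pair + ((rest.countP (fun c => (d.get? c).getD 0 % 3 == 2) + (if true = true then 1 else 0) : Nat) : Int) = 1)) = false := by
            rw [decide_eq_false_iff_not]
            simp only [if_pos rfl]
            push_cast
            omega
          rw [this, Bool.and_false]
        · rw [if_pos (beq_iff_eq.mpr hv2), if_neg hp, ih]
          simp only [pvSpecB, Bool.true_and]
          congr 1
          rw [decide_eq_decide]
          push_cast
          omega
      · have hc : (PySem.Int.mod (v - 2) 3 == 0) = true := by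
          rw [hm2]; exact beq_iff_eq.mpr (by omega)
        rw [if_neg (fun h => hv2 (beq_iff_eq.mp h)), if_pos hc, ih]
        simp only [pvSpecB, Bool.true_and]
        congr 1
        rw [decide_eq_decide]
        push_cast
        omega
    · by_cases hr1 : v % 3 = 1
      · have hd : ¬ ((PySem.Int.mod (v - 2) 3 == 0) = true) := by
          rw [hm2, beq_iff_eq]; omega
        have hz : (!(PySem.Int.mod v 3 == 0) : Bool) = true := by
          rw [hm]; simp [hr1]
        have hQ : (!(v % 3 == 1) : Bool) = false := by simp [hr1]
        rw [if_neg (fun h => hr2 (by rw [beq_iff_eq.mp h]; decide)), if_neg hd, if_pos hz, hQ]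
        simp
      · have hr0 : v % 3 = 0 := by omega
        have hd : ¬ ((PySem.Int.mod (v - 2) 3 == 0) = true) := by
          rw [hm2, beq_iff_eq]; omega
        have hz : ¬ ((!(PySem.Int.mod v 3 == 0) : Bool) = true) := by
          rw [hm]; simp [hr0]
        have hQ : (!(v % 3 == 1) : Bool) = true := by simp [hr0]
        have hP : (v % 3 == 2) = false := by simp [hr0]
        rw [if_neg (fun h => hr2 (by rw [beq_iff_eq.mp h]; decide)), if_neg hd, if_neg hz, ih]
        simp only [pvSpecB, hQ, hP, Bool.true_and, if_neg (by simp : ¬ (false = true))]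
        rfl

lemma pvRunScan_eq :
    ∀ (n : Nat) (t : List Char), t.length ≤ n → t.Pairwise (· ≤ ·) →
      ∀ (pair : Int),
        pvRunScan t pair = pvSpecB (PySem.List.dedup t) (fun c => (t.count c : Int)) pair := by
  intro n
  induction n with
  | zero =>
    intro t ht _ pair
    have : t = [] := List.length_eq_zero_iff.mp (Nat.le_zero.mp ht)
    subst this
    simp [pvRunScan, pvSpecB, PySem.List.dedup]
  | succ n ihn =>
    intro t ht hsorted pair
    match t with
    | [] => simp [pvRunScan, pvSpecB, PySem.List.dedup]
    | c :: rest =>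
      have hrest : rest.Pairwise (· ≤ ·) := List.Pairwise.of_cons hsorted
      have hle : ∀ x ∈ rest, c ≤ x := fun x hx => List.rel_of_pairwise_cons hsorted hx
      set pre := rest.takeWhile (fun x => x == c) with hpre_def
      set suf := rest.dropWhile (fun x => x == c) with hsuf_def
      have hsplit : pre ++ suf = rest := List.takeWhile_append_dropWhile
      have hpre : ∀ x ∈ pre, x = c := by
        intro x hx
        have h := List.mem_takeWhile_imp hx
        exact beq_iff_eq.mp h
      have hsuf_sorted : suf.Pairwise (· ≤ ·) :=
        List.Pairwise.sublist (List.dropWhile_sublist _) hrest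
      have hcgt : ∀ x ∈ suf, c < x := by
        cases hs : suf with
        | nil => simp
        | cons y ys =>
          have hy : (y == c) = false := pvDropHead_false (fun x => x == c) rest y ys (by rw [← hsuf_def]; exact hs)
          have hymem : y ∈ rest := by rw [← hsplit, hs]; simp
          have hcy : c < y :=
            lt_of_le_of_ne (hle y hymem) (Ne.symm (by simpa using hy))
          intro x hx
          rcases List.mem_cons.mp hx with h | hx
          · exact h ▸ hcy
          · have hsufp : (y :: ys).Pairwise (· ≤ ·) := hs ▸ hsuf_sorted
            exact lt_of_lt_of_le hcy (List.rel_of_pairwise_cons hsufp hx)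
      have hcnot : c ∉ suf := fun hc => lt_irrefl c (hcgt c hc)
      -- counts
      have hcount_c : ((c :: rest).count c : Int) = 1 + (pre.length : Int) := by
        rw [List.count_cons_self, ← hsplit, List.count_append,
            List.count_eq_length.mpr (fun b hb => (hpre b hb).symm),
            List.count_eq_zero.mpr hcnot]
        push_cast
        ring
      have hcount_ne : ∀ x, x ≠ c → (c :: rest).count x = suf.count x := by
        intro x hx
        have hpc : pre.count x = 0 :=
          List.count_eq_zero.mpr (fun hmem => hx (hpre x hmem))
        rw [← hsplit]
        simp [List.count_cons, List.count_append, hpc, Ne.symm hx]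
      -- dedup shape
      have hperm : (PySem.List.dedup (c :: rest)).Perm (c :: PySem.List.dedup suf) := by
        rw [List.perm_ext_iff_of_nodup (PySem.List.nodup_dedup _)
            (List.nodup_cons.mpr ⟨fun h => hcnot ((PySem.List.mem_dedup _ _).mp h), PySem.List.nodup_dedup _⟩)]
        intro x
        simp only [PySem.List.mem_dedup, List.mem_cons]
        constructor
        · rintro (h | h)
          · exact Or.inl h
          · rw [← hsplit] at h
            rcases List.mem_append.mp h with h | h
            · exact Or.inl (hpre x h)
            · exact Or.inr h
        · rintro (h | h)
          · exact Or.inl h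
          · exact Or.inr (by rw [← hsplit]; exact List.mem_append_right _ h)
      -- one step of the scan
      have hstep : pvRunScan (c :: rest) pair =
          (if ((PySem.Int.mod (1 + (pre.length : Int)) 3) == 1) then false
           else pvRunScan suf
             (if ((PySem.Int.mod (1 + (pre.length : Int)) 3) == 2) then pair + 1 else pair)) := by
        rw [pvRunScan]
      have hmod : PySem.Int.mod (1 + (pre.length : Int)) 3 = (1 + (pre.length : Int)) % 3 :=
        PySem.Int.mod_eq_emod_of_pos (by norm_num)
      rw [hstep,
          pvSpecB_congr _ _ _ (fun x => ((c :: rest).count x : Int)) pair hperm (fun x _ => rfl),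
          pvSpecB_cons, hmod, ← hcount_c]
      have hsufn : suf.length ≤ n := by
        calc suf.length ≤ rest.length := List.length_dropWhile_le _ _
        _ ≤ n := by simpa using Nat.le_of_succ_le_succ (by simpa using ht)
      have hrec : ∀ p' : Int, pvRunScan suf p' =
          pvSpecB (PySem.List.dedup suf) (fun x => (((c :: rest).count x : Int))) p' := by
        intro p'
        rw [ihn suf hsufn hsuf_sorted p']
        exact pvSpecB_congr _ _ _ _ p' (List.Perm.refl _)
          (fun x hx => by
            rw [hcount_ne x (fun h => hcnot (h ▸ (PySem.List.mem_dedup _ _).mp hx))])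
      by_cases h1 : (((c :: rest).count c : Int) % 3 == 1) = true
      · rw [if_pos h1, if_pos h1]
      · rw [if_neg h1, if_neg h1, hrec]

-- ===== VERDICT (by name: the statement is the Claim_ definition above) =====
theorem pair_and_triplets_spec : Claim_equal_pair_and_triplets := by
  intro s _
  unfold Spec_pair_and_triplets

  have hfun : (fun (d : PySem.Dict Char Int) c =>
      if d.contains c then d.insert c ((d.get? c).getD 0 + 1) else d.insert c 1) =
      (fun (d : PySem.Dict Char Int) c => d.insert c (d.getD c 0 + 1)) := by
    funext d c
    by_cases h : d.contains c = true
    · rw [if_pos h, PySem.Dict.getD_eq_get?_getD]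
    · have hf : d.contains c = false := by revert h; cases d.contains c <;> simp
      rw [if_neg h, PySem.Dict.getD_of_not_contains d 0 hf]
      norm_num
  have hA : pair_and_triplets s =
      pvSpecB (PySem.Set.ofList s.toList) (fun k => (s.toList.count k : Int)) 0 := by
    rw [pair_and_triplets]
    simp only [hfun, PySem.Dict.foldl_insert_getD_add_one_eq_counter]
    rw [pvLoopA_eq, PySem.Dict.keys_counter]
    apply pvSpecB_congr _ _ _ _ _ (List.Perm.refl _)
    intro x _
    rw [← PySem.Dict.getD_eq_get?_getD, PySem.Dict.getD_counter]
  have hsorted : (PySem.List.sorted s.toList (fun x => x) false).Pairwise (· ≤ ·) :=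
    PySem.List.sorted_pairwise _ _
  have hB : pair_and_triplets_alt s =
      pvSpecB (PySem.List.dedup (PySem.List.sorted s.toList (fun x => x) false))
        (fun c => ((PySem.List.sorted s.toList (fun x => x) false).count c : Int)) 0 := by
    rw [pair_and_triplets_alt]
    exact pvRunScan_eq _ _ (le_refl _) hsorted 0
  rw [hA, hB]
  have hp : (PySem.List.sorted s.toList (fun x => x) false).Perm s.toList :=
    PySem.List.sorted_perm _ _ _
  apply pvSpecB_congr
  · rw [List.perm_ext_iff_of_nodup (PySem.Set.nodup_ofList _) (PySem.List.nodup_dedup _)]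
    intro x
    rw [PySem.Set.mem_ofList, PySem.List.mem_dedup, hp.mem_iff]
  · intro x _
    rw [hp.count_eq]
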